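-- pv_equiv track=rewrite | github.com/urakhchina/radial-dual-paper | shelling_benchmark.py | sigma3
-- ===== SOURCE A (Python) =====
-- def sigma3(n):
--     """σ₃(n) = Σ_{d|n} d³ via trial division up to √n."""
--     total = 0
--     d = 1
--     while d * d <= n:
--         if n % d == 0:
--             total += d * d * d
--             other = n // d
--             if other != d:
--                 total += other * other * other
--         d += 1
--     return total
-- ===== SOURCE B (Python) =====
-- def sigma3(n):
--     """σ₃(n) = Σ_{d|n} d³ via prime factorization and the multiplicative
--     formula: σ₃ is multiplicative with σ₃(p^e) = 1 + p³ + ... + p^{3e}."""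
--     if n < 1:
--         return 0
--     total = 1
--     m = n
--     p = 2
--     while p * p <= m:
--         if m % p == 0:
--             pk = 1
--             s = 1
--             while m % p == 0:
--                 m //= p
--                 pk *= p * p * p
--                 s += pk
--             total *= s
--         p += 1
--     if m > 1:
--         total *= 1 + m * m * m
--     return total
-- ===== Notes on version B (the rewrite author's own statement) =====
-- stated objective: alternative
-- what changed: Replaced A's enumeration of divisors by trial division up to sqrt(n) (pairing each divisor d with its cofactor n//d) with prime factorization: extract each prime power p^e from n, accumulate the geometric cube sum 1+p^3+...+p^(3e), and multiply these per-prime factors using the multiplicativity of sigma_3.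
import Mathlib
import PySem

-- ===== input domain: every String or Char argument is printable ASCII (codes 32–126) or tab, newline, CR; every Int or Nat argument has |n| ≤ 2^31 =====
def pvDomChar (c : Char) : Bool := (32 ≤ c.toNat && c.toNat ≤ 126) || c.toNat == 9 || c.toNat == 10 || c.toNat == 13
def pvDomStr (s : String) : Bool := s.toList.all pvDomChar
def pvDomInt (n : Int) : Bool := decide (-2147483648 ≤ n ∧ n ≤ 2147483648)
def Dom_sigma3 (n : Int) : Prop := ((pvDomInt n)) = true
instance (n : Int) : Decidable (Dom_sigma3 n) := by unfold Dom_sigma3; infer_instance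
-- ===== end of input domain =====

-- B replaces A's divisor enumeration (trial division to √n pairing d with n//d) by prime
-- factorization with the multiplicative formula σ₃(n) = Π_p (1 + p³ + … + p^{3e}).

-- ===== PORT A =====
-- A's while loop: state (total, d), runs while d*d ≤ n; fuel only bounds the
-- iteration count (n+1 steps always suffice, since the loop stops once d > n)
def sigma3.loop (n : Int) (fuel : Nat) (total d : Int) : Int :=
  match fuel with
  | 0 => total
  | fuel + 1 =>
    if d * d ≤ n then
      sigma3.loop n fuel
        (if PySem.Int.mod n d = 0 then
          (if PySem.Int.floordiv n d ≠ d then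
            total + d * d * d
              + PySem.Int.floordiv n d * PySem.Int.floordiv n d * PySem.Int.floordiv n d
          else total + d * d * d)
        else total)
        (d + 1)
    else total

def sigma3 (n : Int) : Int := sigma3.loop n (n.toNat + 1) 0 1

-- ===== PORT B =====
-- Source B's inner while loop: divide out p, maintaining (m, pk, s); fuel only bounds the
-- iteration count (m divisions always suffice, since m shrinks by a factor ≥ 2 each step)
def sigma3_alt.inner (p : Int) (fuel : Nat) (m pk s : Int) : Int × Int :=
  match fuel with
  | 0 => (m, s)
  | fuel + 1 =>
    if PySem.Int.mod m p = 0 then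
      sigma3_alt.inner p fuel (PySem.Int.floordiv m p) (pk * (p * p * p)) (s + pk * (p * p * p))
    else (m, s)

-- Source B's outer while loop: state (m, total, p), runs while p*p ≤ m; fuel only bounds the
-- iteration count (n+1 steps always suffice, since p grows past √m ≤ n)
def sigma3_alt.outer (fuel : Nat) (m total p : Int) : Int × Int :=
  match fuel with
  | 0 => (m, total)
  | fuel + 1 =>
    if p * p ≤ m then
      if PySem.Int.mod m p = 0 then
        sigma3_alt.outer fuel (sigma3_alt.inner p m.toNat m 1 1).1
          (total * (sigma3_alt.inner p m.toNat m 1 1).2) (p + 1)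
      else sigma3_alt.outer fuel m total (p + 1)
    else (m, total)

def sigma3_alt (n : Int) : Int :=
  if n < 1 then 0
  else
    if 1 < (sigma3_alt.outer (n.toNat + 1) n 1 2).1 then
      (sigma3_alt.outer (n.toNat + 1) n 1 2).2
        * (1 + (sigma3_alt.outer (n.toNat + 1) n 1 2).1 * (sigma3_alt.outer (n.toNat + 1) n 1 2).1
            * (sigma3_alt.outer (n.toNat + 1) n 1 2).1)
    else (sigma3_alt.outer (n.toNat + 1) n 1 2).2

-- ===== PRECONDITION & SPEC =====
def Spec_sigma3 (n : Int) (out : Int) : Prop := out = sigma3_alt n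
instance (n : Int) (out : Int) : Decidable (Spec_sigma3 n out) := by unfold Spec_sigma3; infer_instance

-- ===== CLAIM (what is proved, stated in full; the proofs are below) =====
def Claim_equal_sigma3 : Prop := ∀ (n : Int), Dom_sigma3 n → Spec_sigma3 n (sigma3 n)

-- ===== LEMMAS AND PROOFS =====

-- the contribution of candidate d in A's loop, as a function of m = n.toNat

def pvBodyA (m d : Nat) : Int :=
  if m % d = 0 then
    (d : Int) * d * d + (if m / d ≠ d then ((m / d : Nat) : Int) * (m / d : Nat) * (m / d : Nat) else 0)
  else 0

-- the contribution of candidate d in B's loop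

-- A's loop accumulates pvBodyA over the remaining candidates d, …, √m

theorem loop_eq_sum (n : Int) (hn : 1 ≤ n) :
    ∀ (fuel : Nat) (d total : Int), 1 ≤ d → Nat.sqrt n.toNat + 1 - d.toNat ≤ fuel →
    sigma3.loop n fuel total d = total + ∑ k ∈ Finset.Icc d.toNat (Nat.sqrt n.toNat), pvBodyA n.toNat k := by
  intro fuel
  induction fuel with
  | zero =>
    intro d total hd hc
    simp only [sigma3.loop]
    rw [Finset.Icc_eq_empty (by omega), Finset.sum_empty, add_zero]
  | succ c ih =>
    intro d total hd hc
    simp only [sigma3.loop]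
    by_cases hdd : d * d ≤ n
    · rw [if_pos hdd]
      have hd0 : (0:Int) ≤ d := by omega
      have hcast : ((d.toNat : Nat) : Int) = d := Int.toNat_of_nonneg hd0
      have hle : d.toNat * d.toNat ≤ n.toNat := by
        have h2 : ((d.toNat : Nat) : Int) * ((d.toNat : Nat) : Int) ≤ ((n.toNat : Nat) : Int) := by
          rw [hcast, Int.toNat_of_nonneg (by omega : (0:Int) ≤ n)]
          exact hdd
        exact_mod_cast h2
      have hds : d.toNat ≤ Nat.sqrt n.toNat := Nat.le_sqrt.mpr hle
      have hmod : PySem.Int.mod n d = ((n.toNat % d.toNat : Nat) : Int) := by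
        conv_lhs => rw [← Int.toNat_of_nonneg (by omega : (0:Int) ≤ n), ← hcast]
        exact PySem.Int.mod_natCast _ _
      have hdiv : PySem.Int.floordiv n d = ((n.toNat / d.toNat : Nat) : Int) := by
        conv_lhs => rw [← Int.toNat_of_nonneg (by omega : (0:Int) ≤ n), ← hcast]
        exact PySem.Int.floordiv_natCast _ _
      rw [ih (d + 1) _ (by omega) (by omega)]
      rw [← Finset.insert_Icc_add_one_left_eq_Icc hds,
        Finset.sum_insert (by simp)]
      have htoNat : (d + 1).toNat = d.toNat + 1 := by omega
      rw [htoNat]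
      unfold pvBodyA
      rw [hmod, hdiv]
      by_cases h0 : n.toNat % d.toNat = 0
      · rw [if_pos (by exact_mod_cast h0), if_pos h0]
        by_cases hne : n.toNat / d.toNat = d.toNat
        · rw [if_neg (by simp [hne, hcast]), if_neg (by simp [hne])]
          push_cast [hcast]; ring
        · have hne' : ((n.toNat / d.toNat : Nat) : Int) ≠ d := by
            rw [← hcast]; exact_mod_cast hne
          rw [if_pos hne', if_pos hne]
          push_cast [hcast]; ring
      · rw [if_neg (by exact_mod_cast h0), if_neg h0]
        ring
    · rw [if_neg hdd]
      have hgt : Nat.sqrt n.toNat < d.toNat := by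
        by_contra h
        have h' : d.toNat ≤ Nat.sqrt n.toNat := by omega
        have hle : d.toNat * d.toNat ≤ n.toNat := Nat.le_sqrt.mp h'
        have hcast : ((d.toNat : Nat) : Int) = d := Int.toNat_of_nonneg (by omega)
        apply hdd
        calc d * d = ((d.toNat * d.toNat : Nat) : Int) := by push_cast [hcast]; ring
          _ ≤ ((n.toNat : Nat) : Int) := by exact_mod_cast hle
          _ = n := Int.toNat_of_nonneg (by omega)
      rw [Finset.Icc_eq_empty (by omega), Finset.sum_empty, add_zero]

-- A as a finite sum over 1..√m

theorem sigma3_eq_sum (n : Int) (hn : 1 ≤ n) :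
    sigma3 n = ∑ k ∈ Finset.Icc 1 (Nat.sqrt n.toNat), pvBodyA n.toNat k := by
  unfold sigma3
  have hs : Nat.sqrt n.toNat ≤ n.toNat := Nat.sqrt_le_self _
  rw [loop_eq_sum n hn (n.toNat + 1) 1 0 (by omega) (by omega)]
  simp

-- bridge: a mapped sum over List.range is the Finset.range sum

-- B as a finite sum over 1..m

-- cube as an Int, for sums over divisors

def pvCube (d : Nat) : Int := (d : Int) * d * d

-- B's sum is the cube sum over the divisors of m

-- for a divisor d of m ≥ 1: the cofactor m/d differs from d iff d² < m (given d² ≤ m)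

theorem cofac_ne (m d : Nat) (_hm : 1 ≤ m) (hd : d ∣ m) (hd1 : 1 ≤ d) (hle : d * d ≤ m) :
    (m / d ≠ d) ↔ d * d < m := by
  have hmul : d * (m / d) = m := Nat.mul_div_cancel' hd
  constructor
  · intro hne
    by_contra h
    have heq : d * d = m := Nat.le_antisymm hle (Nat.le_of_not_lt h)
    have h2 : d * (m / d) = d * d := by rw [hmul, heq]
    exact hne (Nat.eq_of_mul_eq_mul_left (by omega) h2)
  · intro hlt hne
    rw [hne] at hmul
    rw [hmul] at hlt
    exact Nat.lt_irrefl _ hlt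

-- A's sum over 1..√m equals the cube sum over all divisors of m

theorem A_sum_divisors (m : Nat) (hm : 1 ≤ m) :
    ∑ d ∈ Finset.Icc 1 (Nat.sqrt m), pvBodyA m d = ∑ d ∈ m.divisors, pvCube d := by
  have hmem : ∀ d ∈ Finset.Icc 1 (Nat.sqrt m), pvBodyA m d
      = (if d ∣ m then pvCube d else 0)
        + (if d ∣ m ∧ d * d < m then pvCube (m / d) else 0) := by
    intro d hd
    rw [Finset.mem_Icc] at hd
    have hle : d * d ≤ m := Nat.le_sqrt.mp hd.2
    unfold pvBodyA pvCube
    by_cases hdvd : d ∣ m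
    · rw [if_pos (Nat.mod_eq_zero_of_dvd hdvd), if_pos hdvd]
      by_cases hlt : d * d < m
      · rw [if_pos ((cofac_ne m d hm hdvd hd.1 hle).mpr hlt), if_pos ⟨hdvd, hlt⟩]
      · rw [if_neg (by intro h; exact hlt ((cofac_ne m d hm hdvd hd.1 hle).mp h)),
          if_neg (by rintro ⟨_, h⟩; exact hlt h)]
    · rw [if_neg (fun h => hdvd (Nat.dvd_of_mod_eq_zero h)), if_neg hdvd,
        if_neg (by rintro ⟨h, _⟩; exact hdvd h)]
      ring
  rw [Finset.sum_congr rfl hmem, Finset.sum_add_distrib]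
  have hsmall : ∑ d ∈ Finset.Icc 1 (Nat.sqrt m), (if d ∣ m then pvCube d else 0)
      = ∑ d ∈ m.divisors.filter (fun d => d * d ≤ m), pvCube d := by
    rw [← Finset.sum_filter]
    apply Finset.sum_congr _ (fun _ _ => rfl)
    ext d
    simp only [Finset.mem_filter, Finset.mem_Icc, Nat.mem_divisors]
    constructor
    · rintro ⟨⟨h1, h2⟩, h3⟩
      exact ⟨⟨h3, by omega⟩, Nat.le_sqrt.mp h2⟩
    · rintro ⟨⟨h1, h2⟩, h3⟩
      have hd0 : d ≠ 0 := by rintro rfl; simp at h1; omega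
      exact ⟨⟨by omega, Nat.le_sqrt.mpr h3⟩, h1⟩
  have hlarge : ∑ d ∈ Finset.Icc 1 (Nat.sqrt m), (if d ∣ m ∧ d * d < m then pvCube (m / d) else 0)
      = ∑ d ∈ m.divisors.filter (fun d => ¬ d * d ≤ m), pvCube d := by
    rw [← Finset.sum_filter]
    have hsrc : (Finset.Icc 1 (Nat.sqrt m)).filter (fun d => d ∣ m ∧ d * d < m)
        = m.divisors.filter (fun d => d * d < m) := by
      ext d
      simp only [Finset.mem_filter, Finset.mem_Icc, Nat.mem_divisors]
      constructor
      · rintro ⟨⟨h1, h2⟩, h3, h4⟩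
        exact ⟨⟨h3, by omega⟩, h4⟩
      · rintro ⟨⟨h1, h2⟩, h3⟩
        have hd0 : d ≠ 0 := by rintro rfl; simp at h1; omega
        exact ⟨⟨by omega, Nat.le_sqrt.mpr (by omega)⟩, h1, h3⟩
    rw [hsrc]
    apply Finset.sum_nbij' (i := fun d => m / d) (j := fun d => m / d)
    · intro d hd
      simp only [Finset.mem_filter, Nat.mem_divisors] at hd ⊢
      obtain ⟨⟨hdvd, hm0⟩, hlt⟩ := hd
      have hd0 : 0 < d := by
        rcases Nat.eq_zero_or_pos d with h | h
        · subst h; simp at hdvd; omega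
        · exact h
      have hmul : d * (m / d) = m := Nat.mul_div_cancel' hdvd
      have hq0 : 0 < m / d := by
        rcases Nat.eq_zero_or_pos (m / d) with h | h
        · rw [h] at hmul; omega
        · exact h
      refine ⟨⟨Nat.div_dvd_of_dvd hdvd, hm0⟩, ?_⟩
      -- d² < m = d·q ⇒ d < q ⇒ m = d·q < q²
      nlinarith [hmul]
    · intro d hd
      simp only [Finset.mem_filter, Nat.mem_divisors] at hd ⊢
      obtain ⟨⟨hdvd, hm0⟩, hgt⟩ := hd
      rw [Nat.not_le] at hgt
      have hd0 : 0 < d := by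
        rcases Nat.eq_zero_or_pos d with h | h
        · subst h; simp at hdvd; omega
        · exact h
      have hmul : d * (m / d) = m := Nat.mul_div_cancel' hdvd
      have hq0 : 0 < m / d := by
        rcases Nat.eq_zero_or_pos (m / d) with h | h
        · rw [h] at hmul; omega
        · exact h
      refine ⟨⟨Nat.div_dvd_of_dvd hdvd, hm0⟩, ?_⟩
      nlinarith [hmul]
    · intro d hd
      simp only [Finset.mem_filter, Nat.mem_divisors] at hd
      exact Nat.div_div_self hd.1.1 hd.1.2
    · intro d hd
      simp only [Finset.mem_filter, Nat.mem_divisors] at hd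
      exact Nat.div_div_self hd.1.1 hd.1.2
    · intro d _
      rfl
  rw [hsmall, hlarge, Finset.sum_filter_add_sum_filter_not]

-- σ₃ as a Nat function, through Mathlib's divisor-sum arithmetic function
def SN (m : Nat) : Nat := ArithmeticFunction.sigma 3 m

theorem SN_one : SN 1 = 1 := ArithmeticFunction.isMultiplicative_sigma.map_one

theorem SN_mul {a b : Nat} (h : Nat.Coprime a b) : SN (a * b) = SN a * SN b :=
  ArithmeticFunction.isMultiplicative_sigma.map_mul_of_coprime h

theorem SN_prime {p : Nat} (hp : p.Prime) : SN p = 1 + p * p * p := by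
  have h := ArithmeticFunction.sigma_apply_prime_pow (k := 3) (i := 1) hp
  rw [pow_one] at h
  rw [SN, h, Finset.sum_range_succ, Finset.sum_range_one]
  ring

-- σ₃(p^e) written the way Source B's inner loop accumulates it
theorem SN_pow_eq (p e : Nat) (hp : p.Prime) :
    SN (p ^ e) = 1 + ∑ i ∈ Finset.range e, p ^ (3 * (i + 1)) := by
  rw [SN, ArithmeticFunction.sigma_apply_prime_pow hp, Finset.sum_range_succ']
  simp only [Nat.zero_mul, pow_zero]
  rw [Nat.add_comm]
  congr 1
  apply Finset.sum_congr rfl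
  intro i _
  congr 1
  ring

-- Nat model of Source B's inner loop
def innerN (p : Nat) (fuel : Nat) (m pk s : Nat) : Nat × Nat :=
  match fuel with
  | 0 => (m, s)
  | fuel + 1 =>
    if m % p = 0 then innerN p fuel (m / p) (pk * (p * p * p)) (s + pk * (p * p * p))
    else (m, s)

-- Nat model of Source B's outer loop
def outerN (fuel m total p : Nat) : Nat × Nat :=
  match fuel with
  | 0 => (m, total)
  | fuel + 1 =>
    if p * p ≤ m then
      if m % p = 0 then
        outerN fuel (innerN p m m 1 1).1 (total * (innerN p m m 1 1).2) (p + 1)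
      else outerN fuel m total (p + 1)
    else (m, total)

-- the inner loop keeps its first component positive
theorem innerN_fst_pos (p : Nat) (hp : 2 ≤ p) :
    ∀ (fuel m pk s : Nat), 1 ≤ m → 1 ≤ (innerN p fuel m pk s).1 := by
  intro fuel
  induction fuel with
  | zero => intro m pk s hm; simpa [innerN] using hm
  | succ f ih =>
    intro m pk s hm
    simp only [innerN]
    by_cases h0 : m % p = 0
    · rw [if_pos h0]
      have hdvd : p ∣ m := Nat.dvd_of_mod_eq_zero h0
      exact ih (m / p) _ _ ((Nat.one_le_div_iff (by omega)).mpr (Nat.le_of_dvd (by omega) hdvd))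
    · rw [if_neg h0]; exact hm

-- the Int port of the inner loop is the Nat model, under casts
theorem inner_cast (p : Nat) (hp : 2 ≤ p) :
    ∀ (fuel m pk s : Nat), 1 ≤ m →
    sigma3_alt.inner (p : Int) fuel (m : Int) (pk : Int) (s : Int)
      = (((innerN p fuel m pk s).1 : Int), ((innerN p fuel m pk s).2 : Int)) := by
  intro fuel
  induction fuel with
  | zero => intro m pk s hm; simp [sigma3_alt.inner, innerN]
  | succ f ih =>
    intro m pk s hm
    simp only [sigma3_alt.inner, innerN]
    rw [PySem.Int.mod_natCast]
    by_cases h0 : m % p = 0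
    · rw [if_pos (by exact_mod_cast h0), if_pos h0]
      have hdvd : p ∣ m := Nat.dvd_of_mod_eq_zero h0
      have hmp : 1 ≤ m / p := (Nat.one_le_div_iff (by omega)).mpr (Nat.le_of_dvd (by omega) hdvd)
      rw [PySem.Int.floordiv_natCast]
      rw [show ((pk : Int) * ((p : Int) * p * p)) = ((pk * (p * p * p) : Nat) : Int) from by
        push_cast; ring]
      rw [show ((s : Int) + ((pk * (p * p * p) : Nat) : Int)) = ((s + pk * (p * p * p) : Nat) : Int) from by
        push_cast; ring]
      exact ih (m / p) _ _ hmp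
    · rw [if_neg (by exact_mod_cast h0), if_neg h0]

-- the Int port of the outer loop is the Nat model, under casts
theorem outer_cast :
    ∀ (fuel : Nat) (m total p : Nat), 2 ≤ p → 1 ≤ m →
    sigma3_alt.outer fuel (m : Int) (total : Int) (p : Int)
      = (((outerN fuel m total p).1 : Int), ((outerN fuel m total p).2 : Int)) := by
  intro fuel
  induction fuel with
  | zero => intro m total p hp hm; simp [sigma3_alt.outer, outerN]
  | succ f ih =>
    intro m total p hp hm
    simp only [sigma3_alt.outer, outerN]
    by_cases hc : p * p ≤ m
    · rw [if_pos (by exact_mod_cast hc), if_pos hc]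
      rw [PySem.Int.mod_natCast]
      by_cases h0 : m % p = 0
      · rw [if_pos (by exact_mod_cast h0), if_pos h0]
        rw [show ((m : Int)).toNat = m from by simp]
        have hi := inner_cast p hp m m 1 1 hm
        rw [Nat.cast_one] at hi
        rw [hi]
        have ho := ih (innerN p m m 1 1).1 (total * (innerN p m m 1 1).2) (p + 1)
          (by omega) (innerN_fst_pos p hp m m 1 1 hm)
        rw [Nat.cast_mul, Nat.cast_add, Nat.cast_one] at ho
        exact ho
      · rw [if_neg (by exact_mod_cast h0), if_neg h0]
        have ho := ih m total (p + 1) (by omega) hm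
        rw [Nat.cast_add, Nat.cast_one] at ho
        exact ho
    · rw [if_neg (by exact_mod_cast hc), if_neg hc]

-- the inner loop divides out the maximal power of p and accumulates the cube geometric sum
theorem inner_spec (p : Nat) (hp : 2 ≤ p) :
    ∀ (fuel m pk s : Nat), 1 ≤ m → m ≤ fuel →
    ∃ e, innerN p fuel m pk s = (m / p ^ e, s + pk * ∑ i ∈ Finset.range e, p ^ (3 * (i + 1)))
      ∧ p ^ e ∣ m ∧ ¬ p ∣ m / p ^ e := by
  intro fuel
  induction fuel with
  | zero => intro m pk s hm hf; omega
  | succ f ih =>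
    intro m pk s hm hf
    simp only [innerN]
    by_cases h0 : m % p = 0
    · rw [if_pos h0]
      have hdvd : p ∣ m := Nat.dvd_of_mod_eq_zero h0
      have hmp : 1 ≤ m / p := (Nat.one_le_div_iff (by omega)).mpr (Nat.le_of_dvd (by omega) hdvd)
      have hlt : m / p < m := Nat.div_lt_self (by omega) (by omega)
      obtain ⟨e, heq, hdvd', hnd⟩ :=
        ih (m / p) (pk * (p * p * p)) (s + pk * (p * p * p)) hmp (by omega)
      have hdd : m / p / p ^ e = m / p ^ (e + 1) := by
        rw [Nat.div_div_eq_div_mul, ← pow_succ']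
      have hG : ∑ i ∈ Finset.range (e + 1), p ^ (3 * (i + 1))
          = (∑ i ∈ Finset.range e, p ^ (3 * (i + 1))) * p ^ 3 + p ^ 3 := by
        rw [Finset.sum_range_succ', Finset.sum_mul]
        have h0 : p ^ (3 * (0 + 1)) = p ^ 3 := by norm_num
        have hterm : ∀ i : Nat, p ^ (3 * (i + 1 + 1)) = p ^ (3 * (i + 1)) * p ^ 3 := by
          intro i
          rw [← pow_add]
          congr 1
        simp only [hterm, h0]
      refine ⟨e + 1, ?_, ?_, ?_⟩
      · rw [heq, hdd]
        congr 1
        rw [hG]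
        have hp3 : p * p * p = p ^ 3 := by ring
        rw [hp3]
        ring
      · have hmul : p * (m / p) = m := Nat.mul_div_cancel' hdvd
        calc p ^ (e + 1) = p * p ^ e := by rw [pow_succ']
          _ ∣ p * (m / p) := mul_dvd_mul_left p hdvd'
          _ = m := hmul
      · rw [← hdd]; exact hnd
    · rw [if_neg h0]
      refine ⟨0, ?_, one_dvd m, ?_⟩
      · simp
      · rw [pow_zero, Nat.div_one]
        exact fun h => h0 (Nat.mod_eq_zero_of_dvd h)

-- the outer loop: its result (r, t) satisfies t·σ₃(r) = total·σ₃(m), and r is 1 or prime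
theorem outer_spec :
    ∀ (fuel m total p : Nat), 2 ≤ p → 1 ≤ m →
    (∀ q, q.Prime → q ∣ m → p ≤ q) → m + 1 ≤ fuel + p →
    (outerN fuel m total p).2 * SN (outerN fuel m total p).1 = total * SN m
      ∧ ((outerN fuel m total p).1 = 1 ∨ ((outerN fuel m total p).1).Prime) := by
  intro fuel
  induction fuel with
  | zero =>
    intro m total p hp hm hmin hf
    simp only [outerN]
    refine ⟨trivial, Or.inl ?_⟩
    by_contra hne
    have h1 := Nat.minFac_prime (show m ≠ 1 from hne)
    have h2 := hmin _ h1 (Nat.minFac_dvd m)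
    have h3 := Nat.minFac_le (show 0 < m by omega)
    omega
  | succ f ih =>
    intro m total p hp hm hmin hf
    simp only [outerN]
    by_cases hc : p * p ≤ m
    · rw [if_pos hc]
      by_cases h0 : m % p = 0
      · rw [if_pos h0]
        have hdvdp : p ∣ m := Nat.dvd_of_mod_eq_zero h0
        have hpp : p.Prime := by
          have h1 := Nat.minFac_prime (show p ≠ 1 by omega)
          have h2 : p.minFac ∣ m := (Nat.minFac_dvd p).trans hdvdp
          have h3 := hmin _ h1 h2
          have h4 := Nat.minFac_le (show 0 < p by omega)
          have h5 : p.minFac = p := le_antisymm h4 h3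
          rwa [h5] at h1
        obtain ⟨e, heq, hdvd, hnd⟩ := inner_spec p hp m m 1 1 hm le_rfl
        have hpe : 0 < p ^ e := pow_pos (by omega) e
        have hle : p ^ e ≤ m := Nat.le_of_dvd (by omega) hdvd
        have hm' : 1 ≤ m / p ^ e := (Nat.one_le_div_iff hpe).mpr hle
        have hmdvd : m / p ^ e ∣ m := Nat.div_dvd_of_dvd hdvd
        have hmin' : ∀ q, q.Prime → q ∣ m / p ^ e → p + 1 ≤ q := by
          intro q hq hqd
          have h1 := hmin q hq (hqd.trans hmdvd)
          have h2 : q ≠ p := by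
            intro h; rw [h] at hqd; exact hnd hqd
          omega
        have hms : m / p ^ e ≤ m := Nat.div_le_self _ _
        rw [heq]
        obtain ⟨ih1, ih2⟩ := ih (m / p ^ e)
          (total * (1 + 1 * ∑ i ∈ Finset.range e, p ^ (3 * (i + 1)))) (p + 1)
          (by omega) hm' hmin' (by omega)
        refine ⟨?_, ih2⟩
        rw [ih1]
        have hs : 1 + 1 * ∑ i ∈ Finset.range e, p ^ (3 * (i + 1)) = SN (p ^ e) := by
          rw [SN_pow_eq p e hpp, one_mul]
        rw [hs]
        have hcop : Nat.Coprime (p ^ e) (m / p ^ e) :=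
          Nat.Coprime.pow_left e ((Nat.Prime.coprime_iff_not_dvd hpp).mpr hnd)
        have hsplit : m = p ^ e * (m / p ^ e) := (Nat.mul_div_cancel' hdvd).symm
        calc total * SN (p ^ e) * SN (m / p ^ e)
            = total * (SN (p ^ e) * SN (m / p ^ e)) := by ring
          _ = total * SN (p ^ e * (m / p ^ e)) := by rw [SN_mul hcop]
          _ = total * SN m := by rw [← hsplit]
      · rw [if_neg h0]
        have hmin' : ∀ q, q.Prime → q ∣ m → p + 1 ≤ q := by
          intro q hq hqd
          have h1 := hmin q hq hqd
          have h2 : q ≠ p := by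
            intro h; rw [h] at hqd; exact h0 (Nat.mod_eq_zero_of_dvd hqd)
          omega
        exact ih m total (p + 1) (by omega) hm hmin' (by omega)
    · rw [if_neg hc]
      refine ⟨rfl, ?_⟩
      by_cases h1 : m = 1
      · exact Or.inl h1
      · right
        by_contra hnp
        have hmf := Nat.minFac_prime h1
        have h2 := hmin _ hmf (Nat.minFac_dvd m)
        have h3 := Nat.minFac_sq_le_self (show 0 < m by omega) hnp
        have h4 : p ^ 2 ≤ m.minFac ^ 2 := Nat.pow_le_pow_left h2 2
        have h5 : p * p ≤ m := by
          calc p * p = p ^ 2 := by ring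
            _ ≤ m.minFac ^ 2 := h4
            _ ≤ m := h3
        exact hc h5

-- A equals σ₃ of n.toNat (positive n)
theorem A_eq_SN (n : Int) (hn : 1 ≤ n) : sigma3 n = ((SN n.toNat : Nat) : Int) := by
  rw [sigma3_eq_sum n hn, A_sum_divisors n.toNat (by omega)]
  rw [SN, ArithmeticFunction.sigma_apply, Nat.cast_sum]
  apply Finset.sum_congr rfl
  intro d _
  unfold pvCube
  push_cast
  ring

-- B equals σ₃ of n.toNat (positive n)
theorem B_eq_SN (n : Int) (hn : 1 ≤ n) : sigma3_alt n = ((SN n.toNat : Nat) : Int) := by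
  obtain ⟨m, rfl⟩ : ∃ m : Nat, n = (m : Int) := ⟨n.toNat, (Int.toNat_of_nonneg (by omega)).symm⟩
  have hm : 1 ≤ m := by exact_mod_cast hn
  unfold sigma3_alt
  rw [if_neg (by omega : ¬ (m : Int) < 1)]
  rw [show ((m : Int)).toNat = m from by simp]
  rw [show (1 : Int) = ((1 : Nat) : Int) from rfl, show (2 : Int) = ((2 : Nat) : Int) from rfl]
  rw [outer_cast (m + 1) m 1 2 (by omega) hm]
  obtain ⟨h1, h2⟩ := outer_spec (m + 1) m 1 2 (by omega) hm (fun q hq _ => hq.two_le) (by omega)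
  rw [one_mul] at h1
  rcases h2 with h2 | h2
  · rw [h2] at h1 ⊢
    rw [SN_one, mul_one] at h1
    rw [if_neg (show ¬ ((1 : Nat) : Int) < ((1 : Nat) : Int) from by norm_num), h1]
  · have hge : 2 ≤ (outerN (m + 1) m 1 2).1 := h2.two_le
    rw [if_pos (show ((1 : Nat) : Int) < ((outerN (m + 1) m 1 2).1 : Int) from by exact_mod_cast hge)]
    rw [SN_prime h2] at h1
    rw [← h1]
    push_cast
    ring

-- ===== VERDICT (by name: the statement is the Claim_ definition above) =====
theorem sigma3_spec : Claim_equal_sigma3 := by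
  intro n _
  unfold Spec_sigma3
  by_cases hn : n ≤ 0
  · have hA : sigma3 n = 0 := by
      unfold sigma3
      simp only [sigma3.loop]
      rw [if_neg (by omega : ¬ (1:Int) * 1 ≤ n)]
    have hB : sigma3_alt n = 0 := by
      unfold sigma3_alt
      rw [if_pos (by omega : n < 1)]
    rw [hA, hB]
  · rw [A_eq_SN n (by omega), B_eq_SN n (by omega)]
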